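-- pv_equiv track=rewrite | github.com/Mythrehe/curiouscoders-DSA | diffbtwn_sumofsq_and_sqofsum_gfg.py | squaresDiff
-- ===== SOURCE A (Python) =====
-- def squaresDiff (N):
--     import math
--     series=0
--     add=0
--     for i in range(1,N+1):
--         sum=pow(i,2)
--         series=series+sum
--         add=add+i
--         sq_series=pow(add,2)
--     return(abs(series-sq_series))
-- ===== SOURCE B (Python) =====
-- def squaresDiff(N):
--     s = N * (N + 1) // 2
--     ss = N * (N + 1) * (2 * N + 1) // 6
--     return abs(s * s - ss)
-- ===== Notes on version B (the rewrite author's own statement) =====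
-- stated objective: faster
-- what changed: Replaces the O(N) accumulation loop with the closed-form formulas N(N+1)/2 and N(N+1)(2N+1)/6 for the square of sum and sum of squares.
import Mathlib
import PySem

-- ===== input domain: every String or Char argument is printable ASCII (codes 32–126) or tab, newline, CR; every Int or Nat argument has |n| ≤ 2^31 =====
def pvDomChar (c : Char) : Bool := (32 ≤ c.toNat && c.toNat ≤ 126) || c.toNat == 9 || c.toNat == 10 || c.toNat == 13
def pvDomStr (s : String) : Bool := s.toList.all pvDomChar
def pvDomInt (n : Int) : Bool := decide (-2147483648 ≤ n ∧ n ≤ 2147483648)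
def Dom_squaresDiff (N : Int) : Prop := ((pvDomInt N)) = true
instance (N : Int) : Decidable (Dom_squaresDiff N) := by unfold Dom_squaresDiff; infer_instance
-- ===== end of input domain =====

-- ===== PORT A =====
-- B is the O(1) closed-form re-implementation; A's loop is ported literally.
-- sq_series is initialised to 0 in the port: in Python it is unbound before the
-- loop runs (A raises UnboundLocalError for N < 1); Pre_ excludes exactly those inputs.
def squaresDiff (N : Int) : Int :=
  let st := (PySem.List.pyRange 1 (N + 1) 1).foldl
    (fun (st : Int × Int × Int) i =>
      let sum := i ^ 2
      let series := st.1 + sum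
      let add := st.2.1 + i
      let sq_series := add ^ 2
      (series, add, sq_series)) (0, 0, 0)
  |st.1 - st.2.2|

-- ===== PORT B =====
def squaresDiff_alt (N : Int) : Int :=
  let s := PySem.Int.floordiv (N * (N + 1)) 2
  let ss := PySem.Int.floordiv (N * (N + 1) * (2 * N + 1)) 6
  |s * s - ss|

-- ===== PRECONDITION & SPEC =====
-- Pre_ excludes N < 1, where A raises UnboundLocalError (sq_series never assigned).
def Pre_squaresDiff (N : Int) : Prop := 1 <= N
instance (N : Int) : Decidable (Pre_squaresDiff N) := by unfold Pre_squaresDiff; infer_instance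
def pvWitness_squaresDiff : Int := 3

def Spec_squaresDiff (N : Int) (out : Int) : Prop := out = squaresDiff_alt N
instance (N : Int) (out : Int) : Decidable (Spec_squaresDiff N out) := by unfold Spec_squaresDiff; infer_instance

-- ===== CLAIM (what is proved, stated in full; the proofs are below) =====
def Claim_equal_squaresDiff : Prop := ∀ (N : Int), Dom_squaresDiff N → Pre_squaresDiff N → Spec_squaresDiff N (squaresDiff N)

-- ===== LEMMAS AND PROOFS =====
def pvF : Nat → Int
  | 0 => 0
  | n + 1 => pvF n + ((n : Int) + 1) ^ 2

def pvG : Nat → Int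
  | 0 => 0
  | n + 1 => pvG n + ((n : Int) + 1)

def pvStep (st : Int × Int × Int) (i : Int) : Int × Int × Int :=
  let sum := i ^ 2
  let series := st.1 + sum
  let add := st.2.1 + i
  let sq_series := add ^ 2
  (series, add, sq_series)

lemma pvLoop (n : Nat) :
    (PySem.List.pyRange 1 ((n : Int) + 1) 1).foldl pvStep (0, 0, 0)
      = (pvF n, pvG n, (pvG n) ^ 2) := by
  induction n with
  | zero => simp [PySem.List.pyRange_one_eq_nil, pvF, pvG]
  | succ n ih =>
    rw [show (((n + 1 : Nat) : Int) + 1) = ((n : Int) + 1) + 1 by push_cast; ring,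
      PySem.List.pyRange_one_succ_right (by omega),
      List.foldl_append, ih]
    simp [pvStep, pvF, pvG]

lemma pvG_eq (n : Nat) : 2 * pvG n = (n : Int) * ((n : Int) + 1) := by
  induction n with
  | zero => simp [pvG]
  | succ n ih => simp only [pvG]; push_cast; ring_nf; ring_nf at ih; omega

lemma pvF_eq (n : Nat) : 6 * pvF n = (n : Int) * ((n : Int) + 1) * (2 * (n : Int) + 1) := by
  induction n with
  | zero => simp [pvF]
  | succ n ih => simp only [pvF]; push_cast; ring_nf; ring_nf at ih; omega

-- ===== VERDICT (by name: the statement is the Claim_ definition above) =====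
theorem squaresDiff_spec : Claim_equal_squaresDiff := by
  intro N _ hpre
  obtain ⟨n, rfl⟩ : ∃ n : Nat, (n : Int) = N :=
    ⟨N.toNat, Int.toNat_of_nonneg (by exact le_trans (by norm_num) hpre)⟩
  unfold Spec_squaresDiff squaresDiff squaresDiff_alt
  rw [show (fun (st : Int × Int × Int) i =>
      let sum := i ^ 2
      let series := st.1 + sum
      let add := st.2.1 + i
      let sq_series := add ^ 2
      (series, add, sq_series)) = pvStep from rfl]
  have h2 : PySem.Int.floordiv ((n : Int) * ((n : Int) + 1)) 2 = pvG n := by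
    rw [PySem.Int.floordiv_eq_ediv_of_pos (by norm_num), ← pvG_eq,
      Int.mul_ediv_cancel_left _ (by norm_num)]
  have h6 : PySem.Int.floordiv ((n : Int) * ((n : Int) + 1) * (2 * (n : Int) + 1)) 6 = pvF n := by
    rw [PySem.Int.floordiv_eq_ediv_of_pos (by norm_num), ← pvF_eq,
      Int.mul_ediv_cancel_left _ (by norm_num)]
  rw [pvLoop n, h2, h6]
  rw [abs_sub_comm]
  ring_nf
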